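-- pv_equiv track=rewrite | github.com/protagolabs/NexusAgent | src/xyz_agent_context/agent_framework/llm_api/embedding_benchmark.py | build_sample_text
-- ===== SOURCE A (Python) =====
-- DEFAULT_SAMPLE_SENTENCE = (
--     "NarraNexus semantic retrieval benchmark sample. "
--     "This text exercises embedding generation for memory search, "
--     "entity linking, narrative routing, and multilingual context recall."
-- )
--
-- def build_sample_text(target_chars: int = 1536) -> str:
--     """Build a deterministic text payload of at least the requested size."""
--     if target_chars <= 0:
--         raise ValueError("target_chars must be positive")
--
--     chunks: list[str] = []
--     total = 0
--     while total < target_chars: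
--         chunks.append(DEFAULT_SAMPLE_SENTENCE)
--         total += len(DEFAULT_SAMPLE_SENTENCE) + (1 if chunks else 0)
--     return " ".join(chunks)
-- ===== SOURCE B (Python) =====
-- DEFAULT_SAMPLE_SENTENCE = (
--     "NarraNexus semantic retrieval benchmark sample. "
--     "This text exercises embedding generation for memory search, "
--     "entity linking, narrative routing, and multilingual context recall."
-- )
--
-- def build_sample_text(target_chars: int = 1536) -> str:
--     """Build a deterministic text payload of at least the requested size."""
--     if target_chars <= 0:
--         raise ValueError("target_chars must be positive")
--     n = -(-target_chars // (len(DEFAULT_SAMPLE_SENTENCE) + 1))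
--     return " ".join([DEFAULT_SAMPLE_SENTENCE] * n)
-- ===== Notes on version B (the rewrite author's own statement) =====
-- stated objective: simpler
-- what changed: The while-accumulate loop is replaced by a closed-form ceiling-division repetition count n = ceil(target_chars/(len(sentence)+1)) and a single join of n copies.
import Mathlib
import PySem

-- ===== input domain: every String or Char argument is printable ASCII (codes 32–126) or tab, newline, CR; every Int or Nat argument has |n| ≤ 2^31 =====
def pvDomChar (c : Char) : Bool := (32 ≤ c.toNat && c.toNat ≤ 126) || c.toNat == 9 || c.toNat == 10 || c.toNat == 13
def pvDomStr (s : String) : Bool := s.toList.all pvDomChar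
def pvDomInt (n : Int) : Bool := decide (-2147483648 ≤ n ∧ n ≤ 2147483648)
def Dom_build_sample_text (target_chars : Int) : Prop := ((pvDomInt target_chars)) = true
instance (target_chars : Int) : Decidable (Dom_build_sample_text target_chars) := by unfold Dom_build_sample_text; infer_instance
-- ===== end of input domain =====

-- B replaces A's while-accumulate loop by a closed-form ceiling-division count and one join (simpler).

-- ===== PORT A =====
def DEFAULT_SAMPLE_SENTENCE : String :=
  "NarraNexus semantic retrieval benchmark sample. This text exercises embedding generation for memory search, entity linking, narrative routing, and multilingual context recall."

-- the while loop: chunks/total are the loop state; terminates because total strictly grows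
set_option maxRecDepth 4000 in
def pvLoopA (target_chars : Int) (chunks : List String) (total : Int) : List String :=
  if total < target_chars then
    let chunks' := chunks ++ [DEFAULT_SAMPLE_SENTENCE]
    pvLoopA target_chars chunks'
      (total + PySem.Str.len DEFAULT_SAMPLE_SENTENCE + (if chunks' = [] then 0 else 1))
  else chunks
termination_by (target_chars - total).toNat
decreasing_by
  have hne : chunks ++ [DEFAULT_SAMPLE_SENTENCE] ≠ [] := List.append_ne_nil_of_right_ne_nil _ (by simp)
  simp only [PySem.Str.len, dif_neg hne]
  omega

def build_sample_text (target_chars : Int) : String :=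
  PySem.Str.join " " (pvLoopA target_chars [] 0)

-- ===== PORT B =====
def build_sample_text_alt (target_chars : Int) : String :=
  let n : Int := -(PySem.Int.floordiv (-target_chars) (PySem.Str.len DEFAULT_SAMPLE_SENTENCE + 1))
  PySem.Str.join " " (PySem.List.pyRepeat [DEFAULT_SAMPLE_SENTENCE] n)

-- ===== PRECONDITION & SPEC =====
-- Python A raises ValueError for target_chars ≤ 0; excluded here (B raises there too).
def Pre_build_sample_text (target_chars : Int) : Prop := 0 < target_chars
instance (target_chars : Int) : Decidable (Pre_build_sample_text target_chars) := by
  unfold Pre_build_sample_text; infer_instance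
def pvWitness_build_sample_text : Int := (3)

def Spec_build_sample_text (target_chars : Int) (out : String) : Prop := out = build_sample_text_alt target_chars
instance (target_chars : Int) (out : String) : Decidable (Spec_build_sample_text target_chars out) := by unfold Spec_build_sample_text; infer_instance

-- ===== CLAIM (what is proved, stated in full; the proofs are below) =====
def Claim_equal_build_sample_text : Prop := ∀ (target_chars : Int), Dom_build_sample_text target_chars → Pre_build_sample_text target_chars → Spec_build_sample_text target_chars (build_sample_text target_chars)

-- ===== LEMMAS AND PROOFS =====

set_option maxRecDepth 4000 in
theorem pvSentence_len : PySem.Str.len DEFAULT_SAMPLE_SENTENCE = 175 := by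
  simp [PySem.Str.len, DEFAULT_SAMPLE_SENTENCE]

-- loop characterisation: from state (chunks, total) the loop appends exactly
-- ceil((target - total)/176) copies of the sentence
theorem pvLoopA_eq (fuel : Nat) : ∀ (t total : Int) (chunks : List String),
    (t - total).toNat ≤ fuel →
    pvLoopA t chunks total =
      chunks ++ List.replicate (-((total - t) / 176)).toNat DEFAULT_SAMPLE_SENTENCE := by
  induction fuel with
  | zero =>
    intro t total chunks h
    rw [pvLoopA]
    have h0 : (-((total - t) / 176)).toNat = 0 := by omega
    rw [if_neg (by omega : ¬ total < t), h0, List.replicate_zero, List.append_nil]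
  | succ k ih =>
    intro t total chunks h
    rw [pvLoopA]
    by_cases hlt : total < t
    · have hne : chunks ++ [DEFAULT_SAMPLE_SENTENCE] ≠ [] :=
        List.append_ne_nil_of_right_ne_nil _ (by simp)
      rw [if_pos hlt]
      simp only [pvSentence_len, if_neg hne]
      rw [ih t (total + 175 + 1) (chunks ++ [DEFAULT_SAMPLE_SENTENCE]) (by omega)]
      have hcount : (-((total - t) / 176)).toNat
          = (-((total + 175 + 1 - t) / 176)).toNat + 1 := by omega
      rw [hcount, List.replicate_succ, List.append_assoc]
      rfl
    · rw [if_neg hlt, (by omega : (-((total - t) / 176)).toNat = 0),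
        List.replicate_zero, List.append_nil]

-- ===== VERDICT (by name: the statement is the Claim_ definition above) =====
theorem build_sample_text_spec : Claim_equal_build_sample_text := by
  intro t _ hpre
  unfold Spec_build_sample_text build_sample_text build_sample_text_alt
  rw [pvLoopA_eq (t - 0).toNat t 0 [] le_rfl]
  simp only [pvSentence_len, PySem.List.pyRepeat_singleton, List.nil_append,
    PySem.Int.floordiv_eq_ediv_of_pos (show (0:Int) < 175 + 1 by norm_num)]
  congr 2
  omega
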